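-- pv_equiv track=rewrite | github.com/ieee820/sta_sda_generator | sta_sda_common.py | sql_str_add_fields
-- ===== SOURCE A (Python) =====
-- def sql_str_add_fields(sql_str,fields,types,layer=''
--                        ,table_alias= 'a'
--                        ,table_alias1= ''
--                        ,oper_type = 'SELECT'
--                        ,comp_type = ''
--                        ,keys = ''
--                        ,indexes = ''
--                        ,condition = ''
--                        ,middle_str = '\n'
--                        ,end_str = '\n'):
--     sql_str1,sql_str2 = " CONCAT_WS('|@|', "," CONCAT_WS('|@|', "
--     tmp_strs = [s + ',\n' for s in sql_str.split(',\n')]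
--     tmp_strs[-1] = tmp_strs[-1][:-2]
--     if tmp_strs[-1] == '':
--         tmp_strs.remove(tmp_strs[-1])
--     format_gap = ' ' * 20
--     whole_str = sql_str
--
--     for i in range(len(fields) -1):
--         field = fields[i]
--         if layer == 'sta' and oper_type.upper() == 'SELECT' and types[i][0:7] == 'tinyint': # 字段类型转换
--             field = ' CAST(' + table_alias+field+ ' AS CHAR) AS ' + field
--             sql_str += field + ',' + middle_str
--         elif oper_type.upper() == 'JUDGE':
--             if keys != '' and indexes != '':
--                 if field in keys or field in indexes:
--                     continue
--             sql_str += ' ' + table_alias + field + ' ' + comp_type + ' ' + table_alias1 + field + ' ' + condition + middle_str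
--         elif oper_type.upper() == 'COMBINE_JUGE':
--             if keys != '' and indexes != '':
--                 if field in keys or field in indexes:
--                     continue
--             sql_str1 += table_alias+field + ', '
--             sql_str2 += table_alias1+field + ', '
--         elif oper_type.upper() == 'AS':
--             tmp_str = ' '+table_alias +field+format_gap + 'AS'+field+','+middle_str
--             whole_str += tmp_str
--             tmp_strs.append(tmp_str)
--         else:
--             sql_str += ' ' + table_alias + field + ',' + middle_str
--
--     if oper_type.upper() == 'JUDGE':
--         sql_str += ' ' + table_alias + \
--             fields[len(fields) - 1] + ' ' + comp_type + ' ' + \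
--             table_alias1 + fields[len(fields) - 1] + end_str
--     elif oper_type.upper() == 'COMBINE_JUDGE':
--         sql_str1 += table_alias + fields[len(fields) - 1] + ")"
--         sql_str2 += table_alias1 + fields[len(fields) - 1] + ")"
--
--         sql_str += sql_str1 + end_str + ' ' + comp_type + end_str + sql_str2
--     elif oper_type.upper() == 'AS':
--         tmp_str = ' ' + table_alias + fields[len(fields) - 1] + \
--             format_gap + 'AS ' + fields[len(fields) - 1] + end_str
--         whole_str += tmp_str
--         tmp_strs.append(tmp_str)
--         whole_str = format_sql_as_str(whole_str, tmp_strs)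
--         sql_str = whole_str
--     else:
--         sql_str += ' ' + table_alias + fields[len(fields) - 1] + end_str
--     return sql_str
--
-- def format_sql_as_str(
--         whole_str,
--         str_arr=None):
--     if str_arr is None:
--         return ''
--     max_blank = max([string.find(' AS') for string in str_arr])
--     append_blanks = [max_blank - string.find(' AS') for string in str_arr]
--
--     new_str_arr = list(map(lambda string: string[:string.find(' AS')] +
--                            append_blanks[str_arr.index(string)] * ' ' +
--                            string[string.find(' AS'):], str_arr))
--     whole_str = ''.join(new_str_arr)
--     return whole_str
-- ===== SOURCE B (Python) =====
-- def sql_str_add_fields(sql_str, fields, types, layer=''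
--                        , table_alias='a'
--                        , table_alias1=''
--                        , oper_type='SELECT'
--                        , comp_type=''
--                        , keys=''
--                        , indexes=''
--                        , condition=''
--                        , middle_str='\n'
--                        , end_str='\n'):
--     # Recursive decomposition: each mode walks the field list by structural recursion
--     # (the singleton list is the final field), producing a list of line fragments which
--     # is joined once at the end; no index arithmetic, no threaded accumulator state.
--     u = oper_type.upper()
--
--     if u == 'JUDGE':
--         def judge_lines(fs):
--             f = fs[0]
--             if len(fs) == 1:
--                 return [' ' + table_alias + f + ' ' + comp_type + ' ' + table_alias1 + f + end_str]
--             rest = judge_lines(fs[1:])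
--             if keys != '' and indexes != '' and (f in keys or f in indexes):
--                 return rest
--             return [' ' + table_alias + f + ' ' + comp_type + ' ' + table_alias1 + f + ' ' + condition + middle_str] + rest
--         return sql_str + ''.join(judge_lines(fields))
--
--     if u == 'COMBINE_JUDGE':
--         def comb_lines(fs):
--             f = fs[0]
--             if len(fs) == 1:
--                 return [" CONCAT_WS('|@|', " + table_alias + f + ")" + end_str + ' ' + comp_type + end_str
--                         + " CONCAT_WS('|@|', " + table_alias1 + f + ")"]
--             return [' ' + table_alias + f + ',' + middle_str] + comb_lines(fs[1:])
--         return sql_str + ''.join(comb_lines(fields))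
--
--     if u == 'COMBINE_JUGE':
--         # the CONCAT_WS parts accumulated in this mode are never used by the final step
--         return sql_str + ' ' + table_alias + fields[len(fields) - 1] + end_str
--
--     if u == 'AS':
--         def as_lines(fs):
--             f = fs[0]
--             if len(fs) == 1:
--                 return [' ' + table_alias + f + ' ' * 20 + 'AS ' + f + end_str]
--             return [' ' + table_alias + f + ' ' * 20 + 'AS' + f + ',' + middle_str] + as_lines(fs[1:])
--         parts = sql_str.split(',\n')
--         lines = [p + ',\n' for p in parts[:-1]]
--         if parts[-1] != '':
--             lines.append(parts[-1])
--         lines += as_lines(fields)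
--         ps = [(ln.find(' AS'), ln) for ln in lines]
--         mb = max(p for p, _ in ps)
--         return ''.join(ln[:p] + ' ' * (mb - p) + ln[p:] for p, ln in ps)
--
--     def plain_lines(fs, ts):
--         f = fs[0]
--         if len(fs) == 1:
--             return [' ' + table_alias + f + end_str]
--         if layer == 'sta' and u == 'SELECT' and ts[0][0:7] == 'tinyint':
--             line = ' CAST(' + table_alias + f + ' AS CHAR) AS ' + f + ',' + middle_str
--         else:
--             line = ' ' + table_alias + f + ',' + middle_str
--         return [line] + plain_lines(fs[1:], ts[1:])
--     return sql_str + ''.join(plain_lines(fields, types))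
-- ===== Notes on version B (the rewrite author's own statement) =====
-- stated objective: alternative
-- what changed: B replaces A's single index loop threading a 5-part accumulator state with per-mode structural recursion over the field list (the singleton list is the final field), each recursion building a list of line fragments joined once at the end; the AS alignment decorates each line with its precomputed ' AS' position instead of re-finding it and calling list.index.
import Mathlib
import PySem

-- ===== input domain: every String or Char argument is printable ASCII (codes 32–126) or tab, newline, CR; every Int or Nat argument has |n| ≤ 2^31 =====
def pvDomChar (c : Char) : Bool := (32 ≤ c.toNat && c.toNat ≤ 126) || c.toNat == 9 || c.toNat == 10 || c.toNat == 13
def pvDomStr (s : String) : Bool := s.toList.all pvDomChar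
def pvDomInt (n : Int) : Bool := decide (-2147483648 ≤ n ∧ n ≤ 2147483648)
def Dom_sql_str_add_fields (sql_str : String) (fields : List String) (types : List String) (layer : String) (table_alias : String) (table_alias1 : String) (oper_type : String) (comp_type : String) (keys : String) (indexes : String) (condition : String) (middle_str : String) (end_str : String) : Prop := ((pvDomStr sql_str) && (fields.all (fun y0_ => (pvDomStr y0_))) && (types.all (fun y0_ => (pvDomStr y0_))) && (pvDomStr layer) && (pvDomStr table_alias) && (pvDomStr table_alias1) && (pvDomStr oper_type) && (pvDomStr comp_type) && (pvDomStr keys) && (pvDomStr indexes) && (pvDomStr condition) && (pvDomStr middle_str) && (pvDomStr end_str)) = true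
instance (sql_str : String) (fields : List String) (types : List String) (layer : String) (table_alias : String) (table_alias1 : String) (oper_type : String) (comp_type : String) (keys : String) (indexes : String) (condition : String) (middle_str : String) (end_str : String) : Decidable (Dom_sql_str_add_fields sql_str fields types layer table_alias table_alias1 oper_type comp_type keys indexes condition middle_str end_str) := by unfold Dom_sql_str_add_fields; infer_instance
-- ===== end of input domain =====

-- B rebuilds the same SQL string by per-mode structural recursion over the field list producing
-- line fragments joined once (objective: alternative; return value only, A mutates nothing).

-- ' ' * n for a Python int n: empty for n ≤ 0 (exact clamping semantics of Python's str repetition)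
def pyBlanks (n : Int) : String := String.mk (List.replicate n.toNat ' ')

-- ===== PORT A =====
def format_sql_as_str (whole_str : String) (str_arr : Option (List String)) : String :=
  match str_arr with
  | none => ""
  | some arr =>
    -- max([...]) : arr is nonempty at every call site of A (fields ≠ [] appends at least one element)
    let max_blank : Int := ((arr.map (fun s => PySem.Str.find s " AS")).max?).getD 0
    let append_blanks := arr.map (fun s => max_blank - PySem.Str.find s " AS")
    let new_str_arr := arr.map (fun s =>
      PySem.Str.slice s none (some (PySem.Str.find s " AS")) ++
      pyBlanks (append_blanks.getD ((PySem.List.index? arr s).getD 0) 0) ++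
      PySem.Str.slice s (some (PySem.Str.find s " AS")) none)
    PySem.Str.join "" new_str_arr

def sql_str_add_fields (sql_str : String) (fields : List String) (types : List String) (layer : String) (table_alias : String) (table_alias1 : String) (oper_type : String) (comp_type : String) (keys : String) (indexes : String) (condition : String) (middle_str : String) (end_str : String) : String :=
  let sql_str1 := " CONCAT_WS('|@|', "
  let sql_str2 := " CONCAT_WS('|@|', "
  let tmp_strs := ((PySem.Str.split? sql_str ",\n").getD []).map (fun s => s ++ ",\n")
  let tmp_strs := tmp_strs.dropLast ++ [PySem.Str.slice (tmp_strs.getLastD "") none (some (-2))]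
  let tmp_strs := if tmp_strs.getLastD "" == "" then (PySem.List.remove? tmp_strs (tmp_strs.getLastD "")).getD tmp_strs else tmp_strs
  let format_gap := pyBlanks 20
  let whole_str := sql_str
  let st :=
    (PySem.List.pyRange 0 ((fields.length : Int) - 1)).foldl
      (fun (st : String × String × String × String × List String) i =>
        let field := PySem.List.pyGetD fields i ""
        if layer == "sta" && PySem.Str.upper oper_type == "SELECT" && PySem.Str.slice (PySem.List.pyGetD types i "") (some 0) (some 7) == "tinyint" then
          (st.1 ++ (" CAST(" ++ table_alias ++ field ++ " AS CHAR) AS " ++ field ++ "," ++ middle_str), st.2.1, st.2.2.1, st.2.2.2.1, st.2.2.2.2)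
        else if PySem.Str.upper oper_type == "JUDGE" then
          if keys != "" && indexes != "" then
            if PySem.Str.isIn field keys || PySem.Str.isIn field indexes then st
            else (st.1 ++ (" " ++ table_alias ++ field ++ " " ++ comp_type ++ " " ++ table_alias1 ++ field ++ " " ++ condition ++ middle_str), st.2.1, st.2.2.1, st.2.2.2.1, st.2.2.2.2)
          else (st.1 ++ (" " ++ table_alias ++ field ++ " " ++ comp_type ++ " " ++ table_alias1 ++ field ++ " " ++ condition ++ middle_str), st.2.1, st.2.2.1, st.2.2.2.1, st.2.2.2.2)
        else if PySem.Str.upper oper_type == "COMBINE_JUGE" then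
          if keys != "" && indexes != "" then
            if PySem.Str.isIn field keys || PySem.Str.isIn field indexes then st
            else (st.1, st.2.1 ++ (table_alias ++ field ++ ", "), st.2.2.1 ++ (table_alias1 ++ field ++ ", "), st.2.2.2.1, st.2.2.2.2)
          else (st.1, st.2.1 ++ (table_alias ++ field ++ ", "), st.2.2.1 ++ (table_alias1 ++ field ++ ", "), st.2.2.2.1, st.2.2.2.2)
        else if PySem.Str.upper oper_type == "AS" then
          (st.1, st.2.1, st.2.2.1,
            st.2.2.2.1 ++ (" " ++ table_alias ++ field ++ format_gap ++ "AS" ++ field ++ "," ++ middle_str),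
            st.2.2.2.2 ++ [" " ++ table_alias ++ field ++ format_gap ++ "AS" ++ field ++ "," ++ middle_str])
        else
          (st.1 ++ (" " ++ table_alias ++ field ++ "," ++ middle_str), st.2.1, st.2.2.1, st.2.2.2.1, st.2.2.2.2))
      (sql_str, sql_str1, sql_str2, whole_str, tmp_strs)
  let lastf := PySem.List.pyGetD fields ((fields.length : Int) - 1) ""
  if PySem.Str.upper oper_type == "JUDGE" then
    st.1 ++ (" " ++ table_alias ++ lastf ++ " " ++ comp_type ++ " " ++ table_alias1 ++ lastf ++ end_str)
  else if PySem.Str.upper oper_type == "COMBINE_JUDGE" then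
    st.1 ++ ((st.2.1 ++ (table_alias ++ lastf ++ ")")) ++ end_str ++ " " ++ comp_type ++ end_str ++ (st.2.2.1 ++ (table_alias1 ++ lastf ++ ")")))
  else if PySem.Str.upper oper_type == "AS" then
    format_sql_as_str (st.2.2.2.1 ++ (" " ++ table_alias ++ lastf ++ format_gap ++ "AS " ++ lastf ++ end_str))
      (some (st.2.2.2.2 ++ [" " ++ table_alias ++ lastf ++ format_gap ++ "AS " ++ lastf ++ end_str]))
  else
    st.1 ++ (" " ++ table_alias ++ lastf ++ end_str)

-- ===== PORT B =====
-- B's recursive line builders; the [] branch is a totality guard only (Python raises IndexError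
-- there, excluded by Pre_): the singleton list is the final field.
def pvJudgeLines (table_alias table_alias1 comp_type keys indexes condition middle_str end_str : String) : List String → List String
  | [] => []
  | [f] => [" " ++ table_alias ++ f ++ " " ++ comp_type ++ " " ++ table_alias1 ++ f ++ end_str]
  | f :: g :: rest =>
    let r := pvJudgeLines table_alias table_alias1 comp_type keys indexes condition middle_str end_str (g :: rest)
    if keys != "" && indexes != "" && (PySem.Str.isIn f keys || PySem.Str.isIn f indexes) then r
    else (" " ++ table_alias ++ f ++ " " ++ comp_type ++ " " ++ table_alias1 ++ f ++ " " ++ condition ++ middle_str) :: r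

def pvCombLines (table_alias table_alias1 comp_type middle_str end_str : String) : List String → List String
  | [] => []
  | [f] => [" CONCAT_WS('|@|', " ++ table_alias ++ f ++ ")" ++ end_str ++ " " ++ comp_type ++ end_str ++ " CONCAT_WS('|@|', " ++ table_alias1 ++ f ++ ")"]
  | f :: g :: rest => (" " ++ table_alias ++ f ++ "," ++ middle_str) :: pvCombLines table_alias table_alias1 comp_type middle_str end_str (g :: rest)

def pvAsLines (table_alias middle_str end_str : String) : List String → List String
  | [] => []
  | [f] => [" " ++ table_alias ++ f ++ pyBlanks 20 ++ "AS " ++ f ++ end_str]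
  | f :: g :: rest => (" " ++ table_alias ++ f ++ pyBlanks 20 ++ "AS" ++ f ++ "," ++ middle_str) :: pvAsLines table_alias middle_str end_str (g :: rest)

def pvPlainLines (layer u table_alias middle_str end_str : String) : List String → List String → List String
  | [], _ => []
  | [f], _ => [" " ++ table_alias ++ f ++ end_str]
  | f :: g :: rest, ts =>
    (if layer == "sta" && u == "SELECT" && PySem.Str.slice (PySem.List.pyGetD ts 0 "") (some 0) (some 7) == "tinyint" then
      " CAST(" ++ table_alias ++ f ++ " AS CHAR) AS " ++ f ++ "," ++ middle_str
    else " " ++ table_alias ++ f ++ "," ++ middle_str)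
      :: pvPlainLines layer u table_alias middle_str end_str (g :: rest) (PySem.List.slice ts (some 1) none)

def sql_str_add_fields_alt (sql_str : String) (fields : List String) (types : List String) (layer : String) (table_alias : String) (table_alias1 : String) (oper_type : String) (comp_type : String) (keys : String) (indexes : String) (condition : String) (middle_str : String) (end_str : String) : String :=
  let u := PySem.Str.upper oper_type
  if u == "JUDGE" then
    sql_str ++ PySem.Str.join "" (pvJudgeLines table_alias table_alias1 comp_type keys indexes condition middle_str end_str fields)
  else if u == "COMBINE_JUDGE" then
    sql_str ++ PySem.Str.join "" (pvCombLines table_alias table_alias1 comp_type middle_str end_str fields)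
  else if u == "COMBINE_JUGE" then
    -- the CONCAT_WS parts accumulated in this mode are never used by the final step
    sql_str ++ " " ++ table_alias ++ PySem.List.pyGetD fields ((fields.length : Int) - 1) "" ++ end_str
  else if u == "AS" then
    let parts := (PySem.Str.split? sql_str ",\n").getD []
    let lines0 := parts.dropLast.map (fun p => p ++ ",\n")
    let lines1 := if parts.getLastD "" != "" then lines0 ++ [parts.getLastD ""] else lines0
    let lines := lines1 ++ pvAsLines table_alias middle_str end_str fields
    let ps := lines.map (fun ln => (PySem.Str.find ln " AS", ln))
    let mb : Int := ((ps.map (fun p => p.1)).max?).getD 0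
    PySem.Str.join "" (ps.map (fun p =>
      PySem.Str.slice p.2 none (some p.1) ++ pyBlanks (mb - p.1) ++ PySem.Str.slice p.2 (some p.1) none))
  else
    sql_str ++ PySem.Str.join "" (pvPlainLines layer u table_alias middle_str end_str fields types)

-- ===== PRECONDITION & SPEC =====
-- Pre_ excludes exactly the inputs on which the Python A raises IndexError: an empty fields list
-- (fields[len(fields)-1]), and the 'sta'/'SELECT' mode with fewer than len(fields)-1 entries in types
-- (types[i] inside the loop).
def Pre_sql_str_add_fields (sql_str : String) (fields : List String) (types : List String) (layer : String) (table_alias : String) (table_alias1 : String) (oper_type : String) (comp_type : String) (keys : String) (indexes : String) (condition : String) (middle_str : String) (end_str : String) : Prop :=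
  fields ≠ [] ∧ (layer = "sta" → PySem.Str.upper oper_type = "SELECT" → fields.length - 1 ≤ types.length)
instance (sql_str : String) (fields : List String) (types : List String) (layer : String) (table_alias : String) (table_alias1 : String) (oper_type : String) (comp_type : String) (keys : String) (indexes : String) (condition : String) (middle_str : String) (end_str : String) : Decidable (Pre_sql_str_add_fields sql_str fields types layer table_alias table_alias1 oper_type comp_type keys indexes condition middle_str end_str) := by unfold Pre_sql_str_add_fields; infer_instance

def pvWitness_sql_str_add_fields : String × List String × List String × String × String × String × String × String × String × String × String × String × String :=
  ("SELECT", ["f1", "f2"], ["tinyint(1)", "int"], "sta", "a.", "b.", "SELECT", "=", "", "", "", "\n", "\n")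

def Spec_sql_str_add_fields (sql_str : String) (fields : List String) (types : List String) (layer : String) (table_alias : String) (table_alias1 : String) (oper_type : String) (comp_type : String) (keys : String) (indexes : String) (condition : String) (middle_str : String) (end_str : String) (out : String) : Prop := out = sql_str_add_fields_alt sql_str fields types layer table_alias table_alias1 oper_type comp_type keys indexes condition middle_str end_str
instance (sql_str : String) (fields : List String) (types : List String) (layer : String) (table_alias : String) (table_alias1 : String) (oper_type : String) (comp_type : String) (keys : String) (indexes : String) (condition : String) (middle_str : String) (end_str : String) (out : String) : Decidable (Spec_sql_str_add_fields sql_str fields types layer table_alias table_alias1 oper_type comp_type keys indexes condition middle_str end_str out) := by unfold Spec_sql_str_add_fields; infer_instance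

-- ===== CLAIM (what is proved, stated in full; the proofs are below) =====
def Claim_equal_sql_str_add_fields : Prop := ∀ (sql_str : String) (fields : List String) (types : List String) (layer : String) (table_alias : String) (table_alias1 : String) (oper_type : String) (comp_type : String) (keys : String) (indexes : String) (condition : String) (middle_str : String) (end_str : String), Dom_sql_str_add_fields sql_str fields types layer table_alias table_alias1 oper_type comp_type keys indexes condition middle_str end_str → Pre_sql_str_add_fields sql_str fields types layer table_alias table_alias1 oper_type comp_type keys indexes condition middle_str end_str → Spec_sql_str_add_fields sql_str fields types layer table_alias table_alias1 oper_type comp_type keys indexes condition middle_str end_str (sql_str_add_fields sql_str fields types layer table_alias table_alias1 oper_type comp_type keys indexes condition middle_str end_str)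

-- ===== LEMMAS AND PROOFS =====

theorem pv_join_nil : PySem.Str.join "" [] = "" := by
  simp [PySem.Str.join, PySem.Chars.join_nil]

theorem pv_join_cons (x : String) (xs : List String) :
    PySem.Str.join "" (x :: xs) = x ++ PySem.Str.join "" xs := by
  cases xs with
  | nil => simp [PySem.Str.join, PySem.Chars.join_singleton, PySem.Chars.join_nil]
  | cons y ys => simp [PySem.Str.join, PySem.Chars.join_cons_cons, String.ofList_append]

theorem pv_join_append (xs ys : List String) :
    PySem.Str.join "" (xs ++ ys) = PySem.Str.join "" xs ++ PySem.Str.join "" ys := by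
  induction xs with
  | nil => simp [pv_join_nil]
  | cons x xt ih => simp [pv_join_cons, ih, String.append_assoc]

-- a fold that only appends to the accumulator is the initial value ++ the joined pieces
theorem pv_foldl_append_join {β : Type} (f : β → String) (l : List β) (init : String) :
    List.foldl (fun s x => s ++ f x) init l = init ++ PySem.Str.join "" (l.map f) := by
  induction l generalizing init with
  | nil => simp [pv_join_nil]
  | cons x xs ih => simp only [List.foldl_cons, List.map_cons, pv_join_cons, ih, String.append_assoc]

theorem pv_foldl_append_join_if {β : Type} (c : β → Bool) (f : β → String) (l : List β) (init : String) :
    List.foldl (fun s x => if c x then s else s ++ f x) init l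
      = init ++ PySem.Str.join "" ((l.filter (fun x => !c x)).map f) := by
  induction l generalizing init with
  | nil => simp [pv_join_nil]
  | cons x xs ih =>
    by_cases hc : c x
    · simp [hc, ih]
    · simp [hc, ih, pv_join_cons, String.append_assoc]

-- loop-shape lemmas for A's 5-tuple state
theorem pv_loop_if1 (C : Int → Bool) (F : Int → String) (l : List Int) (s0 : String)
    (r : String × String × String × List String) :
    List.foldl (fun (st : String × String × String × String × List String) i =>
        if C i then st else (st.1 ++ F i, st.2.1, st.2.2.1, st.2.2.2.1, st.2.2.2.2)) (s0, r) l
      = (List.foldl (fun s i => if C i then s else s ++ F i) s0 l, r) := by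
  induction l generalizing s0 with
  | nil => rfl
  | cons x xs ih =>
    rw [List.foldl_cons, List.foldl_cons]
    by_cases h : C x = true
    · rw [if_pos h, if_pos h]; exact ih _
    · rw [if_neg h, if_neg h]; exact ih _

theorem pv_loop_judge (c1 : Bool) (c2 : Int → Bool) (F : Int → String) (l : List Int) (s0 : String)
    (r : String × String × String × List String) :
    List.foldl (fun (st : String × String × String × String × List String) i =>
        if c1 then (if c2 i then st else (st.1 ++ F i, st.2.1, st.2.2.1, st.2.2.2.1, st.2.2.2.2))
        else (st.1 ++ F i, st.2.1, st.2.2.1, st.2.2.2.1, st.2.2.2.2)) (s0, r) l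
      = (List.foldl (fun s i => if c1 && c2 i then s else s ++ F i) s0 l, r) := by
  rw [PySem.List.foldl_congr_mem l _
    (fun (st : String × String × String × String × List String) i =>
      if c1 && c2 i then st else (st.1 ++ F i, st.2.1, st.2.2.1, st.2.2.2.1, st.2.2.2.2)) (s0, r)
    (by intro acc x _; by_cases a : c1 = true <;> by_cases b : c2 x = true <;> simp [a, b])]
  exact pv_loop_if1 _ F l s0 r

theorem pv_loop_plain (F : Int → String) (l : List Int) (s0 : String)
    (r : String × String × String × List String) :
    List.foldl (fun (st : String × String × String × String × List String) i =>
        (st.1 ++ F i, st.2.1, st.2.2.1, st.2.2.2.1, st.2.2.2.2)) (s0, r) l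
      = (List.foldl (fun s i => s ++ F i) s0 l, r) := by
  induction l generalizing s0 with
  | nil => rfl
  | cons x xs ih => simpa using ih (s0 ++ F x)

theorem pv_loop_sta (C : Int → Bool) (F G : Int → String) (l : List Int) (s0 : String)
    (r : String × String × String × List String) :
    List.foldl (fun (st : String × String × String × String × List String) i =>
        if C i then (st.1 ++ F i, st.2.1, st.2.2.1, st.2.2.2.1, st.2.2.2.2)
        else (st.1 ++ G i, st.2.1, st.2.2.1, st.2.2.2.1, st.2.2.2.2)) (s0, r) l
      = (List.foldl (fun s i => s ++ (if C i then F i else G i)) s0 l, r) := by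
  induction l generalizing s0 with
  | nil => rfl
  | cons x xs ih =>
    rw [List.foldl_cons, List.foldl_cons]
    by_cases h : C x = true
    · rw [if_pos h, if_pos h]; exact ih _
    · rw [if_neg h, if_neg h]; exact ih _

theorem pv_loop_combju_if (C : Int → Bool) (F G : Int → String) (l : List Int)
    (init : String × String × String × String × List String) :
    (List.foldl (fun (st : String × String × String × String × List String) i =>
        if C i then st else (st.1, st.2.1 ++ F i, st.2.2.1 ++ G i, st.2.2.2.1, st.2.2.2.2)) init l).1 = init.1 := by
  induction l generalizing init with
  | nil => rfl
  | cons x xs ih =>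
    rw [List.foldl_cons]
    by_cases h : C x = true
    · rw [if_pos h]; exact ih _
    · rw [if_neg h]; exact ih _

theorem pv_loop_combju (c1 : Bool) (c2 : Int → Bool) (F G : Int → String) (l : List Int)
    (init : String × String × String × String × List String) :
    (List.foldl (fun (st : String × String × String × String × List String) i =>
        if c1 then (if c2 i then st else (st.1, st.2.1 ++ F i, st.2.2.1 ++ G i, st.2.2.2.1, st.2.2.2.2))
        else (st.1, st.2.1 ++ F i, st.2.2.1 ++ G i, st.2.2.2.1, st.2.2.2.2)) init l).1 = init.1 := by
  rw [PySem.List.foldl_congr_mem l _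
    (fun (st : String × String × String × String × List String) i =>
      if c1 && c2 i then st else (st.1, st.2.1 ++ F i, st.2.2.1 ++ G i, st.2.2.2.1, st.2.2.2.2)) init
    (by intro acc x _; by_cases a : c1 = true <;> by_cases b : c2 x = true <;> simp [a, b])]
  exact pv_loop_combju_if _ F G l init

theorem pv_loop_as (F : Int → String) (l : List Int)
    (init : String × String × String × String × List String) :
    (List.foldl (fun (st : String × String × String × String × List String) i =>
        (st.1, st.2.1, st.2.2.1, st.2.2.2.1 ++ F i, st.2.2.2.2 ++ [F i])) init l).2.2.2.2
      = init.2.2.2.2 ++ l.map F := by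
  induction l generalizing init with
  | nil => simp
  | cons x xs ih => rw [List.foldl_cons, ih]; simp

-- index loop over range(m) reading xs[i] = list loop over xs.take m
theorem pv_foldl_pyRange_take {β : Type} (xs : List String) (g : β → String → β) (init : β)
    (m : Nat) (hm : m ≤ xs.length) :
    List.foldl (fun acc i => g acc (PySem.List.pyGetD xs i "")) init (PySem.List.pyRange 0 (m : Int))
      = List.foldl g init (xs.take m) := by
  have hlen : ((xs.take m).length : Int) = (m : Int) := by simp [List.length_take, Nat.min_eq_left hm]
  have h1 : List.foldl (fun acc i => g acc (PySem.List.pyGetD xs i "")) init (PySem.List.pyRange 0 (m : Int))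
      = List.foldl (fun acc i => g acc (PySem.List.pyGetD (xs.take m) i "")) init (PySem.List.pyRange 0 (m : Int)) := by
    refine PySem.List.foldl_congr_mem _ _ _ _ ?_
    intro acc i hi
    obtain ⟨h0, him⟩ := PySem.List.mem_pyRange_one.mp hi
    have him' : i.toNat < m := by omega
    rw [PySem.List.pyGetD_eq_getElem xs "" h0 (by omega),
        PySem.List.pyGetD_eq_getElem (xs.take m) "" h0 (by omega), List.getElem_take]
  rw [h1]
  have := PySem.List.foldl_pyRange_pyGetD (xs.take m) "" g init (a := 0) le_rfl
  simp only [PySem.List.len, hlen, Int.toNat_zero, List.drop_zero] at this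
  exact this

-- zip truncation: zipping with a taken prefix of the right list changes nothing
theorem pv_zip_take_right {α γ : Type} : ∀ (l : List α) (ys : List γ) (m : Nat), l.length ≤ m →
    l.zip (ys.take m) = l.zip ys := by
  intro l
  induction l with
  | nil => simp
  | cons x xs ih =>
    intro ys m hm
    cases ys with
    | nil => simp
    | cons y yt =>
      cases m with
      | zero => simp at hm
      | succ m => simp only [List.take_succ_cons, List.zip_cons_cons]; rw [ih yt m (by simpa using hm)]

-- index loop over range(m) reading xs[i] and ys[i] = list loop over (xs.take m).zip ys
theorem pv_foldl_pyRange_zip {β : Type} (xs ys : List String) (g : β → String → String → β) (init : β)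
    (m : Nat) (h1 : m ≤ xs.length) (h2 : m ≤ ys.length) :
    List.foldl (fun acc i => g acc (PySem.List.pyGetD xs i "") (PySem.List.pyGetD ys i "")) init (PySem.List.pyRange 0 (m : Int))
      = List.foldl (fun acc p => g acc p.1 p.2) init ((xs.take m).zip ys) := by
  rw [← pv_zip_take_right (xs.take m) ys m (List.length_take_le m xs)]
  induction m generalizing init with
  | zero => simp [PySem.List.pyRange]
  | succ m ih =>
    have hxm : m < xs.length := by omega
    have hym : m < ys.length := by omega
    have hr : PySem.List.pyRange 0 ((m + 1 : Nat) : Int) = PySem.List.pyRange 0 (m : Int) ++ [(m : Int)] := by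
      have : ((m + 1 : Nat) : Int) = (m : Int) + 1 := by push_cast; ring
      rw [this, PySem.List.pyRange_one_succ_right (by positivity)]
    have hx : xs.take (m + 1) = xs.take m ++ [xs[m]] := by
      rw [List.take_succ]; simp [List.getElem?_eq_getElem hxm]
    have hy : ys.take (m + 1) = ys.take m ++ [ys[m]] := by
      rw [List.take_succ]; simp [List.getElem?_eq_getElem hym]
    have hz : (xs.take (m + 1)).zip (ys.take (m + 1)) = (xs.take m).zip (ys.take m) ++ [(xs[m], ys[m])] := by
      rw [hx, hy, List.zip_append (by simp [List.length_take]; omega)]; simp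
    rw [hr, hz, List.foldl_append, List.foldl_append, ih init (by omega) (by omega)]
    simp only [List.foldl_cons, List.foldl_nil]
    rw [PySem.List.pyGetD_eq_getElem xs "" (by positivity) (by exact_mod_cast hxm),
        PySem.List.pyGetD_eq_getElem ys "" (by positivity) (by exact_mod_cast hym)]
    simp

-- removing the (unique) "" that sits at the end of a list of nonempty strings drops the last element
theorem pv_remove_snoc (l : List String) (h : "" ∉ l) : PySem.List.remove? (l ++ [""]) "" = some l := by
  induction l with
  | nil =>
    simp only [PySem.List.remove?, List.nil_append, List.idxOf?_cons, List.idxOf?_nil]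
    simp
  | cons x xs ih =>
    have hx : "" ≠ x := fun hh => h (hh ▸ List.mem_cons_self)
    have hxs : "" ∉ xs := fun hh => h (List.mem_cons_of_mem _ hh)
    have hrec := ih hxs
    simp only [PySem.List.remove?] at hrec ⊢
    rw [List.cons_append, List.idxOf?_cons]
    have hxe : (x == "") = false := beq_eq_false_iff_ne.mpr (fun hh => hx hh.symm)
    cases hk : List.idxOf? "" (xs ++ [""]) with
    | none => rw [hk] at hrec; simp only [Option.map_none] at hrec; exact absurd hrec (by simp)
    | some k =>
      rw [hk] at hrec
      simp only [Option.map_some, Option.some.injEq] at hrec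
      simp only [hxe, Bool.false_eq_true, if_false, hk, Option.map_some, Option.some.injEq,
        List.eraseIdx_cons_succ, hrec]

-- the elements produced by the ',\n' re-append are never empty
theorem pv_snoc_ne_empty (s : String) : s ++ ",\n" ≠ "" := by
  intro h
  have := congrArg String.toList h
  simp [String.toList_append] at this

-- looking up the first index of a member in a mapped list gives its image
theorem pv_getD_map_index? (l : List String) (f : String → Int) (s : String) (hs : s ∈ l) :
    (l.map f).getD ((PySem.List.index? l s).getD 0) 0 = f s := by
  simp only [PySem.List.index?]
  induction l with
  | nil => simp at hs
  | cons x xs ih =>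
    rw [List.idxOf?_cons]
    by_cases hx : x = s
    · simp [hx]
    · have hmem : s ∈ xs := by
        cases hs with
        | head => exact absurd rfl hx
        | tail _ hh => exact hh
      have hxe : (x == s) = false := beq_eq_false_iff_ne.mpr hx
      rw [hxe]
      cases hk : List.idxOf? s xs with
      | none =>
        exact absurd (List.idxOf?_eq_none_iff.mp hk) (by simpa using hmem)
      | some k =>
        have := ih hmem
        rw [hk] at this
        simpa using this

theorem pv_map_pyRange_take (xs : List String) (f : String → String) (m : Nat) (hm : m ≤ xs.length) :
    (PySem.List.pyRange 0 (m : Int)).map (fun i => f (PySem.List.pyGetD xs i "")) = (xs.take m).map f := by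
  have h1 : (PySem.List.pyRange 0 (m : Int)).map (fun i => f (PySem.List.pyGetD xs i ""))
      = (PySem.List.pyRange 0 (m : Int)).map (fun i => f (PySem.List.pyGetD (xs.take m) i "")) := by
    refine List.map_congr_left ?_
    intro i hi
    obtain ⟨h0, him⟩ := PySem.List.mem_pyRange_one.mp hi
    rw [PySem.List.pyGetD_eq_getElem xs "" h0 (by omega),
        PySem.List.pyGetD_eq_getElem (xs.take m) "" h0 (by simp [List.length_take]; omega), List.getElem_take]
  have h2 := PySem.List.map_pyGetD_pyRange_zero (xs.take m) ""
  have hlen : PySem.List.len (xs.take m) = (m : Int) := by simp [PySem.List.len, List.length_take, Nat.min_eq_left hm]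
  rw [h1, show (fun i => f (PySem.List.pyGetD (xs.take m) i "")) = f ∘ (fun i => PySem.List.pyGetD (xs.take m) i "") from rfl,
      ← List.map_map, ← hlen, h2]

-- A's alignment helper, pointwise form
theorem pv_format_eq (w : String) (arr : List String) :
    format_sql_as_str w (some arr)
      = PySem.Str.join "" (arr.map (fun s =>
          PySem.Str.slice s none (some (PySem.Str.find s " AS")) ++
          pyBlanks ((((arr.map (fun t => PySem.Str.find t " AS")).max?).getD 0) - PySem.Str.find s " AS") ++
          PySem.Str.slice s (some (PySem.Str.find s " AS")) none)) := by
  simp only [format_sql_as_str]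
  congr 1
  refine List.map_congr_left ?_
  intro s hs
  rw [pv_getD_map_index? arr (fun t => (((arr.map (fun t => PySem.Str.find t " AS")).max?).getD 0) - PySem.Str.find t " AS") s hs]

theorem pv_not_mem_map_snoc (q : List String) :
    "" ∉ q.map (fun s => s ++ ",\n") := by
  intro hmem
  obtain ⟨s, _, hs⟩ := List.mem_map.mp hmem
  exact pv_snoc_ne_empty s hs

-- stripping the appended ',\n' back off (Python tmp_strs[-1][:-2])
theorem pv_slice_snoc (p : String) : PySem.Str.slice (p ++ ",\n") none (some (-2)) = p := by
  have h : (PySem.Str.slice (p ++ ",\n") none (some (-2))).toList = p.toList := by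
    rw [PySem.Str.toList_slice, PySem.Chars.slice_eq_listSlice,
        PySem.List.slice_to_neg_ofNat _ 2 (by omega)]
    simp [String.toList_append]
  have h2 := congrArg String.ofList h
  rwa [String.ofList_toList, String.ofList_toList] at h2

-- B's decorated alignment pass equals the pointwise form of A's format_sql_as_str
theorem pv_align_eq (arr : List String) :
    PySem.Str.join ""
      ((arr.map (fun ln => (PySem.Str.find ln " AS", ln))).map (fun p =>
        PySem.Str.slice p.2 none (some p.1) ++
        pyBlanks ((((arr.map (fun ln => (PySem.Str.find ln " AS", ln))).map (fun p => p.1)).max?).getD 0 - p.1) ++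
        PySem.Str.slice p.2 (some p.1) none))
      = PySem.Str.join "" (arr.map (fun s =>
          PySem.Str.slice s none (some (PySem.Str.find s " AS")) ++
          pyBlanks ((((arr.map (fun t => PySem.Str.find t " AS")).max?).getD 0) - PySem.Str.find s " AS") ++
          PySem.Str.slice s (some (PySem.Str.find s " AS")) none)) := by
  simp [List.map_map, Function.comp_def]

-- A's tmp_strs trimming equals B's direct construction from the split parts
theorem pv_lines_eq (parts : List String) :
    (let t := parts.map (fun s => s ++ ",\n");
     let t2 := t.dropLast ++ [PySem.Str.slice (t.getLastD "") none (some (-2))];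
     if t2.getLastD "" == "" then (PySem.List.remove? t2 (t2.getLastD "")).getD t2 else t2)
      = (if parts.getLastD "" != "" then parts.dropLast.map (fun p => p ++ ",\n") ++ [parts.getLastD ""]
         else parts.dropLast.map (fun p => p ++ ",\n")) := by
  rcases List.eq_nil_or_concat parts with rfl | ⟨q, p, rfl⟩
  · simp only []
    decide
  · simp only [List.concat_eq_append, List.map_append, List.map_cons, List.map_nil,
      List.dropLast_concat, List.getLastD_concat]
    rw [pv_slice_snoc]
    by_cases hp : p = ""
    · subst hp
      rw [pv_remove_snoc _ (pv_not_mem_map_snoc q)]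
      simp
    · simp [beq_eq_false_iff_ne.mpr hp, hp]

-- spine lemmas: B's recursions on head ++ [last]
theorem pv_judge_spine (ta ta1 ct keys idx cond ms es lst : String) (hs : List String) :
    pvJudgeLines ta ta1 ct keys idx cond ms es (hs ++ [lst])
      = ((hs.filter (fun f => !((keys != "" && idx != "") && (PySem.Str.isIn f keys || PySem.Str.isIn f idx)))).map
          (fun f => " " ++ ta ++ f ++ " " ++ ct ++ " " ++ ta1 ++ f ++ " " ++ cond ++ ms))
        ++ [" " ++ ta ++ lst ++ " " ++ ct ++ " " ++ ta1 ++ lst ++ es] := by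
  induction hs with
  | nil => simp [pvJudgeLines]
  | cons x xs ih =>
    cases hq : xs ++ [lst] with
    | nil => simp at hq
    | cons a t =>
      have hg : pvJudgeLines ta ta1 ct keys idx cond ms es ((x :: xs) ++ [lst])
          = (if keys != "" && idx != "" && (PySem.Str.isIn x keys || PySem.Str.isIn x idx)
             then pvJudgeLines ta ta1 ct keys idx cond ms es (xs ++ [lst])
             else (" " ++ ta ++ x ++ " " ++ ct ++ " " ++ ta1 ++ x ++ " " ++ cond ++ ms)
                  :: pvJudgeLines ta ta1 ct keys idx cond ms es (xs ++ [lst])) := by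
        rw [List.cons_append, hq]
        rfl
      rw [hg, ih]
      by_cases h : (keys != "" && idx != "" && (PySem.Str.isIn x keys || PySem.Str.isIn x idx)) = true
      · rw [if_pos h]
        have hfil : List.filter (fun f => !(keys != "" && idx != "" && (PySem.Str.isIn f keys || PySem.Str.isIn f idx))) (x :: xs) = List.filter (fun f => !(keys != "" && idx != "" && (PySem.Str.isIn f keys || PySem.Str.isIn f idx))) xs := by
          rw [List.filter_cons,
            show (!(keys != "" && idx != "" && (PySem.Str.isIn x keys || PySem.Str.isIn x idx))) = false from by
              rw [h]; decide]
          simp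
        rw [hfil]
      · have hb : (keys != "" && idx != "" && (PySem.Str.isIn x keys || PySem.Str.isIn x idx)) = false := by
          simpa using h
        rw [if_neg h]
        have hfil : List.filter (fun f => !(keys != "" && idx != "" && (PySem.Str.isIn f keys || PySem.Str.isIn f idx))) (x :: xs) = x :: List.filter (fun f => !(keys != "" && idx != "" && (PySem.Str.isIn f keys || PySem.Str.isIn f idx))) xs := by
          rw [List.filter_cons,
            show (!(keys != "" && idx != "" && (PySem.Str.isIn x keys || PySem.Str.isIn x idx))) = true from by
              rw [hb]; decide]
          simp
        rw [hfil, List.map_cons, List.cons_append]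

theorem pv_comb_spine (ta ta1 ct ms es lst : String) (hs : List String) :
    pvCombLines ta ta1 ct ms es (hs ++ [lst])
      = hs.map (fun f => " " ++ ta ++ f ++ "," ++ ms)
        ++ [" CONCAT_WS('|@|', " ++ ta ++ lst ++ ")" ++ es ++ " " ++ ct ++ es ++ " CONCAT_WS('|@|', " ++ ta1 ++ lst ++ ")"] := by
  induction hs with
  | nil => simp [pvCombLines]
  | cons x xs ih =>
    cases hq : xs ++ [lst] with
    | nil => simp at hq
    | cons a t =>
      rw [List.cons_append, hq]
      show pvCombLines ta ta1 ct ms es (x :: a :: t) = _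
      rw [pvCombLines, ← hq, ih]
      simp

theorem pv_as_spine (ta ms es lst : String) (hs : List String) :
    pvAsLines ta ms es (hs ++ [lst])
      = hs.map (fun f => " " ++ ta ++ f ++ pyBlanks 20 ++ "AS" ++ f ++ "," ++ ms)
        ++ [" " ++ ta ++ lst ++ pyBlanks 20 ++ "AS " ++ lst ++ es] := by
  induction hs with
  | nil => simp [pvAsLines]
  | cons x xs ih =>
    cases hq : xs ++ [lst] with
    | nil => simp at hq
    | cons a t =>
      rw [List.cons_append, hq]
      show pvAsLines ta ms es (x :: a :: t) = _
      rw [pvAsLines, ← hq, ih]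
      simp

theorem pv_plain_spine_nonsta (layer u ta ms es lst : String)
    (hx : (layer == "sta" && u == "SELECT") = false) (hs : List String) : ∀ ts : List String,
    pvPlainLines layer u ta ms es (hs ++ [lst]) ts
      = hs.map (fun f => " " ++ ta ++ f ++ "," ++ ms) ++ [" " ++ ta ++ lst ++ es] := by
  induction hs with
  | nil => intro ts; simp [pvPlainLines]
  | cons x xs ih =>
    intro ts
    cases hq : xs ++ [lst] with
    | nil => simp at hq
    | cons a t =>
      rw [List.cons_append, hq]
      show pvPlainLines layer u ta ms es (x :: a :: t) ts = _
      rw [pvPlainLines, ← hq, ih]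
      simp [hx]

theorem pv_plain_spine_sta (layer u ta ms es lst : String)
    (hx : (layer == "sta" && u == "SELECT") = true) (hs : List String) : ∀ ts : List String,
    hs.length ≤ ts.length →
    pvPlainLines layer u ta ms es (hs ++ [lst]) ts
      = (hs.zip ts).map (fun p =>
          if PySem.Str.slice p.2 (some 0) (some 7) == "tinyint" then
            " CAST(" ++ ta ++ p.1 ++ " AS CHAR) AS " ++ p.1 ++ "," ++ ms
          else " " ++ ta ++ p.1 ++ "," ++ ms)
        ++ [" " ++ ta ++ lst ++ es] := by
  induction hs with
  | nil => intro ts _; simp [pvPlainLines]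
  | cons x xs ih =>
    intro ts hlen
    cases ts with
    | nil => simp at hlen
    | cons t0 ts' =>
      cases hq : xs ++ [lst] with
      | nil => simp at hq
      | cons a t =>
        rw [List.cons_append, hq]
        show pvPlainLines layer u ta ms es (x :: a :: t) (t0 :: ts') = _
        rw [pvPlainLines, ← hq, PySem.List.slice_from_one]
        have hget : PySem.List.pyGetD (t0 :: ts') 0 "" = t0 := by
          rw [PySem.List.pyGetD_eq_getElem (t0 :: ts') "" le_rfl (by simp)]; simp
        rw [hget, List.tail_cons, ih ts' (by simpa using hlen)]
        simp [hx]

-- concat decomposition of a nonempty list, with the index/take facts A's loop uses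
theorem pv_last_concat (hs : List String) (lst : String) :
    PySem.List.pyGetD (hs ++ [lst]) (((hs ++ [lst]).length : Int) - 1) "" = lst := by
  have h1 : (((hs ++ [lst]).length : Int) - 1) = (hs.length : Int) := by simp
  rw [h1, PySem.List.pyGetD_eq_getElem (hs ++ [lst]) "" (by positivity) (by simp)]
  simp

theorem pv_take_concat (hs : List String) (lst : String) :
    (hs ++ [lst]).take hs.length = hs := by
  simp [List.take_append]

-- case lemmas
theorem pv_case_judge (sql_str : String) (fields : List String) (types : List String) (layer : String) (table_alias : String) (table_alias1 : String) (oper_type : String) (comp_type : String) (keys : String) (indexes : String) (condition : String) (middle_str : String) (end_str : String)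
    (hne : fields ≠ []) (hu : PySem.Str.upper oper_type = "JUDGE") :
    sql_str_add_fields sql_str fields types layer table_alias table_alias1 oper_type comp_type keys indexes condition middle_str end_str
      = sql_str_add_fields_alt sql_str fields types layer table_alias table_alias1 oper_type comp_type keys indexes condition middle_str end_str := by
  obtain ⟨hs, lst, hfl⟩ := (List.eq_nil_or_concat fields).resolve_left hne
  rw [List.concat_eq_append] at hfl
  subst hfl
  have hcast : (((hs ++ [lst]).length : Int) - 1) = ((hs.length : Nat) : Int) := by simp
  simp only [sql_str_add_fields, sql_str_add_fields_alt, hu]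
  simp only [show (("JUDGE" : String) == "SELECT") = false from rfl,
    show (("JUDGE" : String) == "JUDGE") = true from rfl, Bool.and_false, Bool.false_and,
    Bool.and_true, if_true, if_false, Bool.false_eq_true, ite_true, ite_false]
  rw [pv_last_concat, hcast,
    pv_loop_judge (keys != "" && indexes != "")
      (fun i => PySem.Str.isIn (PySem.List.pyGetD (hs ++ [lst]) i "") keys || PySem.Str.isIn (PySem.List.pyGetD (hs ++ [lst]) i "") indexes)
      (fun i => " " ++ table_alias ++ PySem.List.pyGetD (hs ++ [lst]) i "" ++ " " ++ comp_type ++ " " ++ table_alias1 ++ PySem.List.pyGetD (hs ++ [lst]) i "" ++ " " ++ condition ++ middle_str),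
    pv_foldl_pyRange_take (hs ++ [lst])
      (fun s f => if (keys != "" && indexes != "") && (PySem.Str.isIn f keys || PySem.Str.isIn f indexes) then s
        else s ++ (" " ++ table_alias ++ f ++ " " ++ comp_type ++ " " ++ table_alias1 ++ f ++ " " ++ condition ++ middle_str))
      sql_str hs.length (by simp),
    pv_take_concat,
    pv_foldl_append_join_if
      (fun f => (keys != "" && indexes != "") && (PySem.Str.isIn f keys || PySem.Str.isIn f indexes))
      (fun f => " " ++ table_alias ++ f ++ " " ++ comp_type ++ " " ++ table_alias1 ++ f ++ " " ++ condition ++ middle_str),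
    pv_judge_spine, pv_join_append, pv_join_cons, pv_join_nil]
  simp [String.append_assoc]

theorem pv_case_combine_judge (sql_str : String) (fields : List String) (types : List String) (layer : String) (table_alias : String) (table_alias1 : String) (oper_type : String) (comp_type : String) (keys : String) (indexes : String) (condition : String) (middle_str : String) (end_str : String)
    (hne : fields ≠ []) (hu : PySem.Str.upper oper_type = "COMBINE_JUDGE") :
    sql_str_add_fields sql_str fields types layer table_alias table_alias1 oper_type comp_type keys indexes condition middle_str end_str
      = sql_str_add_fields_alt sql_str fields types layer table_alias table_alias1 oper_type comp_type keys indexes condition middle_str end_str := by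
  obtain ⟨hs, lst, hfl⟩ := (List.eq_nil_or_concat fields).resolve_left hne
  rw [List.concat_eq_append] at hfl
  subst hfl
  have hcast : (((hs ++ [lst]).length : Int) - 1) = ((hs.length : Nat) : Int) := by simp
  simp only [sql_str_add_fields, sql_str_add_fields_alt, hu]
  simp only [show (("COMBINE_JUDGE" : String) == "SELECT") = false from rfl,
    show (("COMBINE_JUDGE" : String) == "JUDGE") = false from rfl,
    show (("COMBINE_JUDGE" : String) == "COMBINE_JUGE") = false from rfl,
    show (("COMBINE_JUDGE" : String) == "AS") = false from rfl,
    show (("COMBINE_JUDGE" : String) == "COMBINE_JUDGE") = true from rfl,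
    Bool.and_false, Bool.false_and, Bool.and_true, if_true, if_false, Bool.false_eq_true, ite_true, ite_false]
  rw [pv_last_concat, hcast,
    pv_loop_plain (fun i => " " ++ table_alias ++ PySem.List.pyGetD (hs ++ [lst]) i "" ++ "," ++ middle_str),
    pv_foldl_pyRange_take (hs ++ [lst]) (fun s f => s ++ (" " ++ table_alias ++ f ++ "," ++ middle_str))
      sql_str hs.length (by simp),
    pv_take_concat,
    pv_foldl_append_join (fun f => " " ++ table_alias ++ f ++ "," ++ middle_str),
    pv_comb_spine, pv_join_append, pv_join_cons, pv_join_nil]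
  simp [String.append_assoc]

theorem pv_case_combju (sql_str : String) (fields : List String) (types : List String) (layer : String) (table_alias : String) (table_alias1 : String) (oper_type : String) (comp_type : String) (keys : String) (indexes : String) (condition : String) (middle_str : String) (end_str : String)
    (hu : PySem.Str.upper oper_type = "COMBINE_JUGE") :
    sql_str_add_fields sql_str fields types layer table_alias table_alias1 oper_type comp_type keys indexes condition middle_str end_str
      = sql_str_add_fields_alt sql_str fields types layer table_alias table_alias1 oper_type comp_type keys indexes condition middle_str end_str := by
  simp only [sql_str_add_fields, sql_str_add_fields_alt, hu]
  simp only [show (("COMBINE_JUGE" : String) == "SELECT") = false from rfl,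
    show (("COMBINE_JUGE" : String) == "JUDGE") = false from rfl,
    show (("COMBINE_JUGE" : String) == "COMBINE_JUGE") = true from rfl,
    show (("COMBINE_JUGE" : String) == "AS") = false from rfl,
    show (("COMBINE_JUGE" : String) == "COMBINE_JUDGE") = false from rfl,
    Bool.and_false, Bool.false_and, Bool.and_true, if_true, if_false, Bool.false_eq_true, ite_true, ite_false]
  rw [pv_loop_combju (keys != "" && indexes != "")
    (fun i => PySem.Str.isIn (PySem.List.pyGetD fields i "") keys || PySem.Str.isIn (PySem.List.pyGetD fields i "") indexes)
    (fun i => table_alias ++ PySem.List.pyGetD fields i "" ++ ", ")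
    (fun i => table_alias1 ++ PySem.List.pyGetD fields i "" ++ ", ")]
  simp [String.append_assoc]

theorem pv_case_as (sql_str : String) (fields : List String) (types : List String) (layer : String) (table_alias : String) (table_alias1 : String) (oper_type : String) (comp_type : String) (keys : String) (indexes : String) (condition : String) (middle_str : String) (end_str : String)
    (hne : fields ≠ []) (hu : PySem.Str.upper oper_type = "AS") :
    sql_str_add_fields sql_str fields types layer table_alias table_alias1 oper_type comp_type keys indexes condition middle_str end_str
      = sql_str_add_fields_alt sql_str fields types layer table_alias table_alias1 oper_type comp_type keys indexes condition middle_str end_str := by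
  obtain ⟨hs, lst, hfl⟩ := (List.eq_nil_or_concat fields).resolve_left hne
  rw [List.concat_eq_append] at hfl
  subst hfl
  have hcast : (((hs ++ [lst]).length : Int) - 1) = ((hs.length : Nat) : Int) := by simp
  simp only [sql_str_add_fields, sql_str_add_fields_alt, hu]
  simp only [show (("AS" : String) == "SELECT") = false from rfl,
    show (("AS" : String) == "JUDGE") = false from rfl,
    show (("AS" : String) == "COMBINE_JUGE") = false from rfl,
    show (("AS" : String) == "AS") = true from rfl,
    show (("AS" : String) == "COMBINE_JUDGE") = false from rfl,
    Bool.and_false, Bool.false_and, Bool.and_true, if_true, if_false, Bool.false_eq_true, ite_true, ite_false]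
  rw [pv_format_eq, pv_last_concat, hcast,
    pv_loop_as (fun i => " " ++ table_alias ++ PySem.List.pyGetD (hs ++ [lst]) i "" ++ pyBlanks 20 ++ "AS" ++ PySem.List.pyGetD (hs ++ [lst]) i "" ++ "," ++ middle_str),
    pv_map_pyRange_take (hs ++ [lst]) (fun f => " " ++ table_alias ++ f ++ pyBlanks 20 ++ "AS" ++ f ++ "," ++ middle_str) hs.length (by simp),
    pv_take_concat, pv_lines_eq, pv_as_spine, pv_align_eq]
  rw [List.append_assoc]

theorem pv_case_else (sql_str : String) (fields : List String) (types : List String) (layer : String) (table_alias : String) (table_alias1 : String) (oper_type : String) (comp_type : String) (keys : String) (indexes : String) (condition : String) (middle_str : String) (end_str : String)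
    (hne : fields ≠ [])
    (hty : layer = "sta" → PySem.Str.upper oper_type = "SELECT" → fields.length - 1 ≤ types.length)
    (h1 : PySem.Str.upper oper_type ≠ "JUDGE") (h2 : PySem.Str.upper oper_type ≠ "COMBINE_JUDGE")
    (h3 : PySem.Str.upper oper_type ≠ "AS") (h4 : PySem.Str.upper oper_type ≠ "COMBINE_JUGE") :
    sql_str_add_fields sql_str fields types layer table_alias table_alias1 oper_type comp_type keys indexes condition middle_str end_str
      = sql_str_add_fields_alt sql_str fields types layer table_alias table_alias1 oper_type comp_type keys indexes condition middle_str end_str := by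
  obtain ⟨hs, lst, hfl⟩ := (List.eq_nil_or_concat fields).resolve_left hne
  rw [List.concat_eq_append] at hfl
  simp only [sql_str_add_fields, sql_str_add_fields_alt,
    beq_eq_false_iff_ne.mpr h1, beq_eq_false_iff_ne.mpr h2, beq_eq_false_iff_ne.mpr h3,
    beq_eq_false_iff_ne.mpr h4, Bool.and_false, Bool.false_and, if_false, Bool.false_eq_true,
    ite_false]
  subst hfl
  have hcast : (((hs ++ [lst]).length : Int) - 1) = ((hs.length : Nat) : Int) := by simp
  by_cases hla : layer = "sta"
  · by_cases hse : PySem.Str.upper oper_type = "SELECT"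
    · have hm : hs.length ≤ types.length := by
        have := hty hla hse; simp at this; omega
      simp only [hla, hse, show (("sta" : String) == "sta") = true from rfl,
        show (("SELECT" : String) == "SELECT") = true from rfl, Bool.true_and, if_true, ite_true]
      rw [pv_last_concat, hcast,
        pv_loop_sta (fun i => PySem.Str.slice (PySem.List.pyGetD types i "") (some 0) (some 7) == "tinyint")
          (fun i => " CAST(" ++ table_alias ++ PySem.List.pyGetD (hs ++ [lst]) i "" ++ " AS CHAR) AS " ++ PySem.List.pyGetD (hs ++ [lst]) i "" ++ "," ++ middle_str)
          (fun i => " " ++ table_alias ++ PySem.List.pyGetD (hs ++ [lst]) i "" ++ "," ++ middle_str),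
        pv_foldl_pyRange_zip (hs ++ [lst]) types
          (fun s f t => s ++ (if PySem.Str.slice t (some 0) (some 7) == "tinyint" then
              " CAST(" ++ table_alias ++ f ++ " AS CHAR) AS " ++ f ++ "," ++ middle_str
            else " " ++ table_alias ++ f ++ "," ++ middle_str))
          sql_str hs.length (by simp) hm,
        pv_take_concat,
        pv_foldl_append_join (fun p : String × String =>
          if PySem.Str.slice p.2 (some 0) (some 7) == "tinyint" then
            " CAST(" ++ table_alias ++ p.1 ++ " AS CHAR) AS " ++ p.1 ++ "," ++ middle_str
          else " " ++ table_alias ++ p.1 ++ "," ++ middle_str),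
        pv_plain_spine_sta "sta" "SELECT" table_alias middle_str end_str lst (by decide) hs types hm,
        pv_join_append, pv_join_cons, pv_join_nil]
      simp [String.append_assoc]
    · have he : (PySem.Str.upper oper_type == "SELECT") = false := beq_eq_false_iff_ne.mpr hse
      simp only [he, Bool.false_and, Bool.and_false, if_false, Bool.false_eq_true, ite_false]
      rw [pv_last_concat, hcast,
        pv_loop_plain (fun i => " " ++ table_alias ++ PySem.List.pyGetD (hs ++ [lst]) i "" ++ "," ++ middle_str),
        pv_foldl_pyRange_take (hs ++ [lst]) (fun s f => s ++ (" " ++ table_alias ++ f ++ "," ++ middle_str))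
          sql_str hs.length (by simp),
        pv_take_concat,
        pv_foldl_append_join (fun f => " " ++ table_alias ++ f ++ "," ++ middle_str),
        pv_plain_spine_nonsta layer (PySem.Str.upper oper_type) table_alias middle_str end_str lst
          (by simp [he]) hs types,
        pv_join_append, pv_join_cons, pv_join_nil]
      simp [String.append_assoc]
  · have he : (layer == "sta") = false := beq_eq_false_iff_ne.mpr hla
    simp only [he, Bool.false_and, if_false, Bool.false_eq_true, ite_false]
    rw [pv_last_concat, hcast,
      pv_loop_plain (fun i => " " ++ table_alias ++ PySem.List.pyGetD (hs ++ [lst]) i "" ++ "," ++ middle_str),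
      pv_foldl_pyRange_take (hs ++ [lst]) (fun s f => s ++ (" " ++ table_alias ++ f ++ "," ++ middle_str))
        sql_str hs.length (by simp),
      pv_take_concat,
      pv_foldl_append_join (fun f => " " ++ table_alias ++ f ++ "," ++ middle_str),
      pv_plain_spine_nonsta layer (PySem.Str.upper oper_type) table_alias middle_str end_str lst
        (by simp [he]) hs types,
      pv_join_append, pv_join_cons, pv_join_nil]
    simp [String.append_assoc]

-- ===== VERDICT =====
theorem sql_str_add_fields_spec : Claim_equal_sql_str_add_fields := by
  intro sql_str fields types layer table_alias table_alias1 oper_type comp_type keys indexes condition middle_str end_str hdom hpre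
  obtain ⟨hne, hty⟩ := hpre
  unfold Spec_sql_str_add_fields
  by_cases h1 : PySem.Str.upper oper_type = "JUDGE"
  · exact pv_case_judge _ _ _ _ _ _ _ _ _ _ _ _ _ hne h1
  by_cases h2 : PySem.Str.upper oper_type = "COMBINE_JUDGE"
  · exact pv_case_combine_judge _ _ _ _ _ _ _ _ _ _ _ _ _ hne h2
  by_cases h4 : PySem.Str.upper oper_type = "COMBINE_JUGE"
  · exact pv_case_combju _ _ _ _ _ _ _ _ _ _ _ _ _ h4
  by_cases h3 : PySem.Str.upper oper_type = "AS"
  · exact pv_case_as _ _ _ _ _ _ _ _ _ _ _ _ _ hne h3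
  exact pv_case_else _ _ _ _ _ _ _ _ _ _ _ _ _ hne hty h1 h2 h3 h4
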